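-- pv_equiv track=rewrite | github.com/pherbke/studentVC | backend/src/student_manager.py | _create_field_mapping
-- ===== SOURCE A (Python) =====
-- from typing import Dict, List, Optional, Tuple
--
-- def _create_field_mapping(fieldnames: List[str]) -> Dict[str, str]:
--     """Create case-insensitive field mapping"""
--     mapping = {}
--
--     # Common field name variations
--     field_variations = {
--         'firstName': ['firstname', 'first_name', 'fname', 'givenname', 'vorname'],
--         'lastName': ['lastname', 'last_name', 'lname', 'surname', 'nachname'],
--         'studentId': ['studentid', 'student_id', 'id', 'matrikelnummer', 'student_number'],
--         'studentIdPrefix': ['studentidprefix', 'student_id_prefix', 'prefix', 'id_prefix'],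
--         'email': ['email', 'mail', 'e_mail', 'email_address'],
--         'program': ['program', 'course', 'studiengang', 'major', 'degree'],
--         'semester': ['semester', 'term', 'year', 'academic_year'],
--         'enrollmentYear': ['enrollmentyear', 'enrollment_year', 'entry_year', 'start_year']
--     }
--
--     # Create mapping
--     for field_name, variations in field_variations.items():
--         for fieldname in fieldnames:
--             if fieldname.lower().strip() in [v.lower() for v in variations + [field_name.lower()]]:
--                 mapping[field_name] = fieldname
--                 break
--
--     return mapping
-- ===== SOURCE B (Python) =====
-- FIELD_VARIATIONS = {
--     'firstName': ['firstname', 'first_name', 'fname', 'givenname', 'vorname'],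
--     'lastName': ['lastname', 'last_name', 'lname', 'surname', 'nachname'],
--     'studentId': ['studentid', 'student_id', 'id', 'matrikelnummer', 'student_number'],
--     'studentIdPrefix': ['studentidprefix', 'student_id_prefix', 'prefix', 'id_prefix'],
--     'email': ['email', 'mail', 'e_mail', 'email_address'],
--     'program': ['program', 'course', 'studiengang', 'major', 'degree'],
--     'semester': ['semester', 'term', 'year', 'academic_year'],
--     'enrollmentYear': ['enrollmentyear', 'enrollment_year', 'entry_year', 'start_year']
-- }
--
-- # inverted index: normalized variation -> canonical field name (variation sets are disjoint)
-- _INDEX = {v: f for f, vs in FIELD_VARIATIONS.items() for v in vs + [f.lower()]}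
--
-- def _create_field_mapping(fieldnames):
--     """Create case-insensitive field mapping"""
--     found = {}
--     for fieldname in fieldnames:
--         field = _INDEX.get(fieldname.lower().strip())
--         if field is not None and field not in found:
--             found[field] = fieldname
--     return {f: found[f] for f in FIELD_VARIATIONS if f in found}
-- ===== Notes on version B (the rewrite author's own statement) =====
-- stated objective: faster
-- what changed: Replaces A's per-field rescans of fieldnames (with the lowered membership list rebuilt on every test) by a precomputed inverted index from normalized variation to canonical field and a single pass over fieldnames, emitting the result in canonical field order.
import Mathlib
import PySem

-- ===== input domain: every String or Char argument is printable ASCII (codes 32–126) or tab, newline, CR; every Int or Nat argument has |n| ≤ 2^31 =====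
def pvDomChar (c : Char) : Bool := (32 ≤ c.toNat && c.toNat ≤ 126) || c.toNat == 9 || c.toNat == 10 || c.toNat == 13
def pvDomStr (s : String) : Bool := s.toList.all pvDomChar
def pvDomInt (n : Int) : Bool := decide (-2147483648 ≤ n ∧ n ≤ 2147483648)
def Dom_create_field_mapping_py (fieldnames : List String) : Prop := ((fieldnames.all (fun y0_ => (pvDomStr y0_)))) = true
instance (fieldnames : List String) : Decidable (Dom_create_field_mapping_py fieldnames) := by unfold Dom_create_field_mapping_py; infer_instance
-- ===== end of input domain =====

-- B replaces A's per-field scans over fieldnames (membership list rebuilt per test) by one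
-- precomputed inverted index dict and a single pass over fieldnames (objective: faster).

-- the literal field_variations table (shared by both ports)
def fieldVariations : List (String × List String) :=
  [("firstName", ["firstname", "first_name", "fname", "givenname", "vorname"]),
   ("lastName", ["lastname", "last_name", "lname", "surname", "nachname"]),
   ("studentId", ["studentid", "student_id", "id", "matrikelnummer", "student_number"]),
   ("studentIdPrefix", ["studentidprefix", "student_id_prefix", "prefix", "id_prefix"]),
   ("email", ["email", "mail", "e_mail", "email_address"]),
   ("program", ["program", "course", "studiengang", "major", "degree"]),
   ("semester", ["semester", "term", "year", "academic_year"]),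
   ("enrollmentYear", ["enrollmentyear", "enrollment_year", "entry_year", "start_year"])]

-- ===== PORT A =====
-- for field_name, variations: for fieldname: if fieldname.lower().strip() in [...]: mapping[field_name] = fieldname; break
def create_field_mapping_py (fieldnames : List String) : List (String × String) :=
  (fieldVariations.foldl
    (fun mapping p =>
      match fieldnames.find? (fun fieldname =>
          ((p.2 ++ [PySem.Str.lower p.1]).map PySem.Str.lower).contains
            (PySem.Str.strip (PySem.Str.lower fieldname))) with
      | some fieldname => mapping.insert p.1 fieldname
      | none => mapping)
    PySem.Dict.empty).items

-- ===== PORT B =====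
-- _INDEX = {v: f for f, vs in FIELD_VARIATIONS.items() for v in vs + [f.lower()]}
def fmIndex : PySem.Dict String String :=
  PySem.Dict.ofList
    (fieldVariations.flatMap (fun p => (p.2 ++ [PySem.Str.lower p.1]).map (fun v => (v, p.1))))

-- one pass over fieldnames through the inverted index, then the ordered comprehension
-- {f: found[f] for f in FIELD_VARIATIONS if f in found} (distinct keys in order = this filterMap)
def create_field_mapping_py_alt (fieldnames : List String) : List (String × String) :=
  let found := fieldnames.foldl
    (fun found fieldname =>
      match fmIndex.get? (PySem.Str.strip (PySem.Str.lower fieldname)) with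
      | some field => if found.contains field then found else found.insert field fieldname
      | none => found)
    PySem.Dict.empty
  fieldVariations.filterMap (fun p => (found.get? p.1).map (fun fn => (p.1, fn)))

-- ===== PRECONDITION & SPEC =====
def Spec_create_field_mapping_py (fieldnames : List String) (out : List (String × String)) : Prop := out = create_field_mapping_py_alt fieldnames
instance (fieldnames : List String) (out : List (String × String)) : Decidable (Spec_create_field_mapping_py fieldnames out) := by unfold Spec_create_field_mapping_py; infer_instance

-- ===== CLAIM (what is proved, stated in full; the proofs are below) =====
def Claim_equal_create_field_mapping_py : Prop := ∀ (fieldnames : List String), Dom_create_field_mapping_py fieldnames → Spec_create_field_mapping_py fieldnames (create_field_mapping_py fieldnames)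

-- ===== LEMMAS AND PROOFS =====

-- A's predicate for a table row p
def predA (p : String × List String) (fieldname : String) : Bool :=
  ((p.2 ++ [PySem.Str.lower p.1]).map PySem.Str.lower).contains
    (PySem.Str.strip (PySem.Str.lower fieldname))

-- B's predicate for a canonical field f
def predB (f : String) (fieldname : String) : Bool :=
  fmIndex.get? (PySem.Str.strip (PySem.Str.lower fieldname)) == some f

-- A's fold inserts each field key at most once (keys of the table are distinct), so its
-- dict items are a filterMap over the table
lemma foldA_items (fieldnames : List String) (fs : List (String × List String))
    (d : PySem.Dict String String)
    (hnd : d.keys.Nodup)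
    (hfresh : ∀ p ∈ fs, d.contains p.1 = false)
    (hfs : (fs.map Prod.fst).Nodup) :
    (fs.foldl
      (fun mapping p =>
        match fieldnames.find? (predA p) with
        | some fieldname => mapping.insert p.1 fieldname
        | none => mapping) d).items
    = d.items ++ fs.filterMap (fun p => (fieldnames.find? (predA p)).map (fun fn => (p.1, fn))) := by
  induction fs generalizing d with
  | nil => simp
  | cons p fs ih =>
    have hd : d.contains p.1 = false := hfresh p (List.mem_cons_self ..)
    have htl : ∀ q ∈ fs, d.contains q.1 = false := fun q hq => hfresh q (List.mem_cons_of_mem _ hq)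
    simp only [List.foldl_cons, List.filterMap_cons, List.map_cons, List.nodup_cons] at *
    cases hfind : fieldnames.find? (predA p) with
    | none =>
      simp only [Option.map_none]
      exact ih d hnd htl hfs.2
    | some fn =>
      simp only [Option.map_some]
      rw [ih (d.insert p.1 fn)
            (PySem.Dict.nodup_keys_insert _ _ _ hnd)
            (fun q hq => by
              rw [PySem.Dict.contains_insert]
              have h1 : (q.1 == p.1) = false := by
                simp only [beq_eq_false_iff_ne, ne_eq]
                intro h
                exact hfs.1 (h ▸ List.mem_map_of_mem hq)
              simp [h1, htl q hq])
            hfs.2]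
      rw [PySem.Dict.items_insert_of_not_contains _ _ hd]
      simp

-- B's fold: lookup of f in the accumulated dict is the old value, else the first matching fieldname
lemma foldB_get? (fns : List String) (d : PySem.Dict String String) (f : String) :
    ((fns.foldl
      (fun found fieldname =>
        match fmIndex.get? (PySem.Str.strip (PySem.Str.lower fieldname)) with
        | some field => if found.contains field then found else found.insert field fieldname
        | none => found) d).get? f)
    = match d.get? f with
      | some v => some v
      | none => fns.find? (predB f) := by
  induction fns generalizing d with
  | nil => cases h : d.get? f <;> simp [h]
  | cons fn fns ih =>
    simp only [List.foldl_cons, List.find?_cons]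
    cases hidx : fmIndex.get? (PySem.Str.strip (PySem.Str.lower fn)) with
    | none =>
      have hp : predB f fn = false := by simp [predB, hidx]
      rw [hp, ih]
    | some g =>
      by_cases hgf : g = f
      · subst hgf
        have hp : predB g fn = true := by simp [predB, hidx]
        rw [hp]
        by_cases hc : d.contains g
        · simp only [hc, if_true, ih]
          cases hdg : d.get? g with
          | none =>
            rw [PySem.Dict.get?_eq_none_iff_contains] at hdg
            rw [hdg] at hc
            exact absurd hc (by simp)
          | some v => rfl
        · simp only [Bool.not_eq_true] at hc
          simp only [hc, if_false, Bool.false_eq_true, ih]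
          rw [PySem.Dict.get?_insert_self]
          rw [← PySem.Dict.get?_eq_none_iff_contains] at hc
          rw [hc]
      · have hp : predB f fn = false := by simp [predB, hidx, hgf]
        rw [hp]
        by_cases hc : d.contains g
        · simp [hc, ih]
        · simp only [hc, if_false, Bool.false_eq_true, ih]
          rw [PySem.Dict.get?_insert_of_ne _ _ (fun h => hgf h.symm)]

-- the computed inverted index as a literal dict
set_option maxRecDepth 10000 in
lemma fmIndex_eq : fmIndex = PySem.Dict.mk
  [("firstname", "firstName"), ("first_name", "firstName"), ("fname", "firstName"),
   ("givenname", "firstName"), ("vorname", "firstName"),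
   ("lastname", "lastName"), ("last_name", "lastName"), ("lname", "lastName"),
   ("surname", "lastName"), ("nachname", "lastName"),
   ("studentid", "studentId"), ("student_id", "studentId"), ("id", "studentId"),
   ("matrikelnummer", "studentId"), ("student_number", "studentId"),
   ("studentidprefix", "studentIdPrefix"), ("student_id_prefix", "studentIdPrefix"),
   ("prefix", "studentIdPrefix"), ("id_prefix", "studentIdPrefix"),
   ("email", "email"), ("mail", "email"), ("e_mail", "email"), ("email_address", "email"),
   ("program", "program"), ("course", "program"), ("studiengang", "program"),
   ("major", "program"), ("degree", "program"),
   ("semester", "semester"), ("term", "semester"), ("year", "semester"),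
   ("academic_year", "semester"),
   ("enrollmentyear", "enrollmentYear"), ("enrollment_year", "enrollmentYear"),
   ("entry_year", "enrollmentYear"), ("start_year", "enrollmentYear")] := by decide

-- the two predicates agree on every row of the table
lemma predRow (f : String) (vs : List String) (keys : List String)
    (hk : (vs ++ [PySem.Str.lower f]).map PySem.Str.lower = keys)
    (hfwd : ∀ s, fmIndex.get? s = some f → s ∈ keys)
    (hbwd : ∀ s ∈ keys, fmIndex.get? s = some f) :
    predB f = predA (f, vs) := by
  funext fn
  rw [Bool.eq_iff_iff]
  simp only [predA, predB, beq_iff_eq, List.contains_iff_mem, hk]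
  exact ⟨hfwd _, hbwd _⟩

set_option maxRecDepth 20000 in
lemma predRow_firstName : predB "firstName" = predA ("firstName", ["firstname", "first_name", "fname", "givenname", "vorname"]) :=
  predRow "firstName" ["firstname", "first_name", "fname", "givenname", "vorname"] ["firstname", "first_name", "fname", "givenname", "vorname", "firstname"] (by decide)
    (fun s h => by
      have hm := PySem.Dict.mem_items_of_get?_eq_some _ h
      rw [fmIndex_eq] at hm
      simp only [List.mem_cons, Prod.mk.injEq, List.not_mem_nil,
        or_false] at hm
      simp only [List.mem_cons, List.not_mem_nil, or_false]
      tauto)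
    (fun s hs => by fin_cases hs <;> (rw [fmIndex_eq]; decide))

set_option maxRecDepth 20000 in
lemma predRow_lastName : predB "lastName" = predA ("lastName", ["lastname", "last_name", "lname", "surname", "nachname"]) :=
  predRow "lastName" ["lastname", "last_name", "lname", "surname", "nachname"] ["lastname", "last_name", "lname", "surname", "nachname", "lastname"] (by decide)
    (fun s h => by
      have hm := PySem.Dict.mem_items_of_get?_eq_some _ h
      rw [fmIndex_eq] at hm
      simp only [List.mem_cons, Prod.mk.injEq, List.not_mem_nil,
        or_false] at hm
      simp only [List.mem_cons, List.not_mem_nil, or_false]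
      tauto)
    (fun s hs => by fin_cases hs <;> (rw [fmIndex_eq]; decide))

set_option maxRecDepth 20000 in
lemma predRow_studentId : predB "studentId" = predA ("studentId", ["studentid", "student_id", "id", "matrikelnummer", "student_number"]) :=
  predRow "studentId" ["studentid", "student_id", "id", "matrikelnummer", "student_number"] ["studentid", "student_id", "id", "matrikelnummer", "student_number", "studentid"] (by decide)
    (fun s h => by
      have hm := PySem.Dict.mem_items_of_get?_eq_some _ h
      rw [fmIndex_eq] at hm
      simp only [List.mem_cons, Prod.mk.injEq, List.not_mem_nil,
        or_false] at hm
      simp only [List.mem_cons, List.not_mem_nil, or_false]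
      tauto)
    (fun s hs => by fin_cases hs <;> (rw [fmIndex_eq]; decide))

set_option maxRecDepth 20000 in
lemma predRow_studentIdPrefix : predB "studentIdPrefix" = predA ("studentIdPrefix", ["studentidprefix", "student_id_prefix", "prefix", "id_prefix"]) :=
  predRow "studentIdPrefix" ["studentidprefix", "student_id_prefix", "prefix", "id_prefix"] ["studentidprefix", "student_id_prefix", "prefix", "id_prefix", "studentidprefix"] (by decide)
    (fun s h => by
      have hm := PySem.Dict.mem_items_of_get?_eq_some _ h
      rw [fmIndex_eq] at hm
      simp only [List.mem_cons, Prod.mk.injEq, List.not_mem_nil,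
        or_false] at hm
      simp only [List.mem_cons, List.not_mem_nil, or_false]
      tauto)
    (fun s hs => by fin_cases hs <;> (rw [fmIndex_eq]; decide))

set_option maxRecDepth 20000 in
lemma predRow_email : predB "email" = predA ("email", ["email", "mail", "e_mail", "email_address"]) :=
  predRow "email" ["email", "mail", "e_mail", "email_address"] ["email", "mail", "e_mail", "email_address", "email"] (by decide)
    (fun s h => by
      have hm := PySem.Dict.mem_items_of_get?_eq_some _ h
      rw [fmIndex_eq] at hm
      simp only [List.mem_cons, Prod.mk.injEq, List.not_mem_nil,
        or_false] at hm
      simp only [List.mem_cons, List.not_mem_nil, or_false]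
      tauto)
    (fun s hs => by fin_cases hs <;> (rw [fmIndex_eq]; decide))

set_option maxRecDepth 20000 in
lemma predRow_program : predB "program" = predA ("program", ["program", "course", "studiengang", "major", "degree"]) :=
  predRow "program" ["program", "course", "studiengang", "major", "degree"] ["program", "course", "studiengang", "major", "degree", "program"] (by decide)
    (fun s h => by
      have hm := PySem.Dict.mem_items_of_get?_eq_some _ h
      rw [fmIndex_eq] at hm
      simp only [List.mem_cons, Prod.mk.injEq, List.not_mem_nil,
        or_false] at hm
      simp only [List.mem_cons, List.not_mem_nil, or_false]
      tauto)
    (fun s hs => by fin_cases hs <;> (rw [fmIndex_eq]; decide))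

set_option maxRecDepth 20000 in
lemma predRow_semester : predB "semester" = predA ("semester", ["semester", "term", "year", "academic_year"]) :=
  predRow "semester" ["semester", "term", "year", "academic_year"] ["semester", "term", "year", "academic_year", "semester"] (by decide)
    (fun s h => by
      have hm := PySem.Dict.mem_items_of_get?_eq_some _ h
      rw [fmIndex_eq] at hm
      simp only [List.mem_cons, Prod.mk.injEq, List.not_mem_nil,
        or_false] at hm
      simp only [List.mem_cons, List.not_mem_nil, or_false]
      tauto)
    (fun s hs => by fin_cases hs <;> (rw [fmIndex_eq]; decide))

set_option maxRecDepth 20000 in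
lemma predRow_enrollmentYear : predB "enrollmentYear" = predA ("enrollmentYear", ["enrollmentyear", "enrollment_year", "entry_year", "start_year"]) :=
  predRow "enrollmentYear" ["enrollmentyear", "enrollment_year", "entry_year", "start_year"] ["enrollmentyear", "enrollment_year", "entry_year", "start_year", "enrollmentyear"] (by decide)
    (fun s h => by
      have hm := PySem.Dict.mem_items_of_get?_eq_some _ h
      rw [fmIndex_eq] at hm
      simp only [List.mem_cons, Prod.mk.injEq, List.not_mem_nil,
        or_false] at hm
      simp only [List.mem_cons, List.not_mem_nil, or_false]
      tauto)
    (fun s hs => by fin_cases hs <;> (rw [fmIndex_eq]; decide))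

lemma pred_eq (p : String × List String) (hp : p ∈ fieldVariations) :
    predB p.1 = predA p := by
  fin_cases hp
  · exact predRow_firstName
  · exact predRow_lastName
  · exact predRow_studentId
  · exact predRow_studentIdPrefix
  · exact predRow_email
  · exact predRow_program
  · exact predRow_semester
  · exact predRow_enrollmentYear

-- ===== VERDICT (by name: the statement is the Claim_ definition above) =====
theorem create_field_mapping_py_spec : Claim_equal_create_field_mapping_py := by
  intro fieldnames _
  show (fieldVariations.foldl
      (fun mapping p =>
        match fieldnames.find? (predA p) with
        | some fieldname => mapping.insert p.1 fieldname
        | none => mapping) PySem.Dict.empty).items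
    = create_field_mapping_py_alt fieldnames
  unfold create_field_mapping_py_alt
  simp only [foldB_get? fieldnames PySem.Dict.empty, PySem.Dict.get?_empty]
  rw [foldA_items fieldnames fieldVariations PySem.Dict.empty (by decide)
      (fun p _ => by rw [PySem.Dict.contains_empty]) (by decide)]
  rw [show (PySem.Dict.empty : PySem.Dict String String).items = [] from rfl, List.nil_append]
  refine (List.filterMap_congr fun p hp => ?_).symm
  rw [pred_eq p hp]
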